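-- pv_equiv track=rewrite | github.com/JordanDaudu/Year2 | Principles_Of_Software_Languages/Assignment2/main.py | is_prime_square
-- ===== SOURCE A (Python) =====
-- def is_prime_square(numbers): # Question 2
--     """
--     This function calculates the squares of all prime numbers in the input list.
--
--     Parameters:
--     numbers (list): A list of integers, assume only positive numbers.
--
--     Returns:
--     list: A list containing the squares of all prime numbers in the input list.
--     """
--     def square(x):
--         """
--         Calculate the square of a number.
--
--         Parameters:
--         x (int): The number to square.
--
--         Returns:
--         int: The square of the number.
--         """
--         return x ** 2
--
--     def is_prime(n):
--         """
--         Check if a number is a prime number.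
--
--         Parameters:
--         n (int): The number to check.
--
--         Returns:
--         bool: True if the number is prime, False otherwise.
--         """
--         if n <= 1:
--             return False
--         for i in range(2, int(n ** 0.5) + 1):
--             if n % i == 0:
--                 return False
--         return True
--
--     # Filter the list to include only prime numbers
--     prime_numbers_square = filter(is_prime, numbers)
--     # Apply the square function only to the filtered prime numbers
--     prime_numbers_square = map(square, prime_numbers_square)
--     # Convert the result to a list and return.
--     return list(prime_numbers_square)
-- ===== SOURCE B (Python) =====
-- def is_prime_square(numbers):
--     """Squares of the prime numbers in the list, in order (precomputed prime table)."""
--     if not numbers: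
--         return []
--     m = max(numbers)
--     # L = isqrt(m) for m >= 0 (0 for negative m), computed without floats
--     L = 0
--     while (L + 1) * (L + 1) <= m:
--         L += 1
--
--     def trial(x, ps):
--         for p in ps:
--             if p * p > x:
--                 return True
--             if x % p == 0:
--                 return False
--         return True
--
--     # prime table up to L: each candidate is tested against the earlier primes only
--     primes = []
--     for p in range(2, L + 1):
--         if trial(p, primes):
--             primes.append(p)
--
--     # an element is prime iff no prime p with p * p <= x divides it
--     return [x * x for x in numbers if x >= 2 and trial(x, primes)]
-- ===== Notes on version B (the rewrite author's own statement) =====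
-- stated objective: faster
-- what changed: Per-element trial division by every integer in range(2, int(n**0.5)+1) is replaced by a prime table precomputed up to isqrt(max(numbers)) (each candidate tested against earlier primes only), after which each element is trial-divided only by those primes with an early break at p*p > x.
import Mathlib
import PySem

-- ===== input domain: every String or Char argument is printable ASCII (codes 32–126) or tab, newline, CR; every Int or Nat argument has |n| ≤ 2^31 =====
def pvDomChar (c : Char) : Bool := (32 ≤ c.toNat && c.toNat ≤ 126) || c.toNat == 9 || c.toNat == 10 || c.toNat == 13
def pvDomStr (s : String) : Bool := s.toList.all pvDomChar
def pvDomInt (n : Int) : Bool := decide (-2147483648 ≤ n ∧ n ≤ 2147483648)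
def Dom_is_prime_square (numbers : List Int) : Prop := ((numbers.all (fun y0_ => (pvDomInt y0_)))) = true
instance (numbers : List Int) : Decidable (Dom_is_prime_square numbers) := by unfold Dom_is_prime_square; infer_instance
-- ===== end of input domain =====

-- B replaces per-element trial division by every integer up to int(sqrt(n)) with a precomputed
-- prime table up to isqrt(max(numbers)) and trial division by those primes only (measured faster).

-- ===== PORT A =====
-- is_prime's loop: 'for i in range(2, int(n ** 0.5) + 1): if n % i == 0: return False' / 'return True'.
-- int(n ** 0.5) is ported as Nat.sqrt n.toNat: exact for 0 ≤ n ≤ 2^31 (double sqrt is exact to far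
-- below the distance 1/(2*sqrt n) to the next integer there); the branch is only reached for n ≥ 2.
def pvIsPrimeA (n : Int) : Bool :=
  if n ≤ 1 then false
  else (PySem.List.pyRange 2 ((Nat.sqrt n.toNat : Int) + 1) 1).all
         (fun i => !(PySem.Int.mod n i == 0))

-- square(x) = x ** 2, i.e. x * x
def is_prime_square (numbers : List Int) : List Int :=
  (numbers.filter pvIsPrimeA).map (fun x => x * x)

-- ===== PORT B =====
-- 'L = 0; while (L + 1) * (L + 1) <= m: L += 1'
def pvSqrtLoopB (m : Int) (L : Nat) : Nat :=
  if ((L : Int) + 1) * ((L : Int) + 1) ≤ m then pvSqrtLoopB m (L + 1) else L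
termination_by m.toNat - L
decreasing_by
  have h1 : ((L : Int) + 1) ≤ ((L : Int) + 1) * ((L : Int) + 1) :=
    le_mul_of_one_le_left (by positivity) (by omega)
  omega

-- 'def trial(x, ps): for p in ps: if p * p > x: return True; if x % p == 0: return False; return True'
def pvTrialB (x : Int) : List Int → Bool
  | [] => true
  | p :: ps =>
    if x < p * p then true
    else if PySem.Int.mod x p == 0 then false
    else pvTrialB x ps

-- 'primes = []; for p in range(2, L + 1): if trial(p, primes): primes.append(p)'
def pvBuildPrimesB (cand : List Int) (acc : List Int) : List Int :=
  match cand with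
  | [] => acc
  | p :: rest => if pvTrialB p acc then pvBuildPrimesB rest (acc ++ [p]) else pvBuildPrimesB rest acc

def is_prime_square_alt (numbers : List Int) : List Int :=
  if numbers.isEmpty then []
  else
    match PySem.List.max? numbers (fun y => y) with
    | none => []   -- unreachable: numbers is non-empty
    | some m =>
      let primes := pvBuildPrimesB (PySem.List.pyRange 2 ((pvSqrtLoopB m 0 : Int) + 1) 1) []
      (numbers.filter (fun x => decide (2 ≤ x) && pvTrialB x primes)).map (fun x => x * x)

-- ===== PRECONDITION & SPEC =====
def Spec_is_prime_square (numbers : List Int) (out : List Int) : Prop := out = is_prime_square_alt numbers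
instance (numbers : List Int) (out : List Int) : Decidable (Spec_is_prime_square numbers out) := by unfold Spec_is_prime_square; infer_instance

-- ===== CLAIM (what is proved, stated in full; the proofs are below) =====
def Claim_equal_is_prime_square : Prop := ∀ (numbers : List Int), Dom_is_prime_square numbers → Spec_is_prime_square numbers (is_prime_square numbers)

-- ===== LEMMAS AND PROOFS =====

-- proof-side predicate: p is a (natural) prime
def pvIsP (p : Int) : Bool := decide (Nat.Prime p.toNat)

-- i ≤ isqrt x ↔ i*i ≤ x, over Int
lemma pvLeSqrtInt (x i : Int) (hx : 0 ≤ x) (hi : 0 ≤ i) :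
    i ≤ (Nat.sqrt x.toNat : Int) ↔ i * i ≤ x := by
  lift x to ℕ using hx
  lift i to ℕ using hi
  rw [Int.toNat_natCast]
  exact_mod_cast Nat.le_sqrt

lemma pvSqrtLoopB_eq (m : Int) (hm : 0 ≤ m) :
    ∀ k L : Nat, m.toNat - L ≤ k → L * L ≤ m.toNat → pvSqrtLoopB m L = Nat.sqrt m.toNat := by
  intro k
  induction k with
  | zero =>
    intro L hk hL
    rw [pvSqrtLoopB]
    split_ifs with h
    · exfalso
      have h1 : ((L : Int) + 1) ≤ ((L : Int) + 1) * ((L : Int) + 1) :=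
        le_mul_of_one_le_left (by positivity) (by omega)
      have h2 : (L : Int) + 1 ≤ m := le_trans h1 h
      omega
    · have hlt : m.toNat < (L + 1) * (L + 1) := by
        by_contra hc
        push Not at hc
        have h' : ((((L + 1) * (L + 1) : Nat)) : Int) ≤ m := by omega
        exact h (by exact_mod_cast h')
      have h2 : L ≤ Nat.sqrt m.toNat := Nat.le_sqrt.mpr hL
      have h3 : Nat.sqrt m.toNat < L + 1 := Nat.sqrt_lt.mpr hlt
      omega
  | succ k ih =>
    intro L hk hL
    rw [pvSqrtLoopB]
    split_ifs with h
    · have h2 : ((((L + 1) * (L + 1) : Nat)) : Int) ≤ m := by push_cast; linarith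
      have h2n : (L + 1) * (L + 1) ≤ m.toNat := by omega
      have h3 : L + 1 ≤ (L + 1) * (L + 1) := Nat.le_mul_of_pos_left _ (by omega)
      exact ih (L + 1) (by omega) h2n
    · have hlt : m.toNat < (L + 1) * (L + 1) := by
        by_contra hc
        push Not at hc
        have h' : ((((L + 1) * (L + 1) : Nat)) : Int) ≤ m := by omega
        exact h (by exact_mod_cast h')
      have h2 : L ≤ Nat.sqrt m.toNat := Nat.le_sqrt.mpr hL
      have h3 : Nat.sqrt m.toNat < L + 1 := Nat.sqrt_lt.mpr hlt
      omega

lemma pvSqrtLoopB_zero (m : Int) : pvSqrtLoopB m 0 = Nat.sqrt m.toNat := by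
  by_cases hm : 0 ≤ m
  · exact pvSqrtLoopB_eq m hm m.toNat 0 (by omega) (by omega)
  · rw [pvSqrtLoopB]
    split_ifs with h
    · exfalso; omega
    · have : m.toNat = 0 := by omega
      simp [this]

-- "no divisor i with 2 ≤ i and i*i ≤ x" is primality of x.toNat
lemma pvNoSmallDiv_iff_prime (x : Int) (hx : 2 ≤ x) :
    (∀ i : Int, 2 ≤ i → i * i ≤ x → ¬ i ∣ x) ↔ Nat.Prime x.toNat := by
  obtain ⟨n, rfl⟩ : ∃ n : ℕ, x = (n : Int) := ⟨x.toNat, (Int.toNat_of_nonneg (by omega)).symm⟩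
  rw [Int.toNat_natCast, Nat.prime_def_le_sqrt]
  constructor
  · intro h
    refine ⟨by exact_mod_cast hx, ?_⟩
    intro mm h2m hms hdvd
    exact h (mm : Int) (by exact_mod_cast h2m)
      (by exact_mod_cast Nat.le_sqrt.mp hms) (by exact_mod_cast hdvd)
  · rintro ⟨-, h⟩
    intro i h2i hii hdvd
    obtain ⟨j, rfl⟩ : ∃ j : ℕ, i = (j : Int) := ⟨i.toNat, (Int.toNat_of_nonneg (by omega)).symm⟩
    exact h j (by exact_mod_cast h2i)
      (Nat.le_sqrt.mpr (by exact_mod_cast hii)) (by exact_mod_cast hdvd)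

lemma pvTrialB_eq (x : Int) (l : List Int) (hs : l.Pairwise (· < ·)) (h2 : ∀ p ∈ l, 2 ≤ p) :
    (pvTrialB x l = true) ↔ ∀ p ∈ l, p * p ≤ x → ¬ p ∣ x := by
  induction l with
  | nil => simp [pvTrialB]
  | cons p ps ih =>
    rw [List.pairwise_cons] at hs
    have h2p : 2 ≤ p := h2 p List.mem_cons_self
    rw [pvTrialB]
    split_ifs with hlt hmod
    · simp only [true_iff]
      intro q hq hqq
      exfalso
      have hpq : p ≤ q := by
        rcases List.mem_cons.mp hq with h | h
        · omega
        · exact le_of_lt (hs.1 q h)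
      have : p * p ≤ q * q := mul_le_mul hpq hpq (by omega) (by omega)
      omega
    · have hdvd : p ∣ x := by
        rw [beq_iff_eq, PySem.Int.mod_eq_zero_iff_dvd] at hmod
        exact hmod
      simp only [false_iff]
      push Not
      exact ⟨p, List.mem_cons_self, by omega, hdvd⟩
    · have hndvd : ¬ p ∣ x := by
        rw [beq_iff_eq, PySem.Int.mod_eq_zero_iff_dvd] at hmod
        exact hmod
      rw [ih hs.2 (fun q hq => h2 q (List.mem_cons_of_mem p hq))]
      constructor
      · intro h q hq
        rcases List.mem_cons.mp hq with h' | h'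
        · subst h'; intro _; exact hndvd
        · exact h q h'
      · intro h q hq
        exact h q (List.mem_cons_of_mem p hq)

lemma pvMemFilterIsP (b q : Int) :
    q ∈ (PySem.List.pyRange 2 b 1).filter pvIsP ↔ 2 ≤ q ∧ q ≤ b - 1 ∧ Nat.Prime q.toNat := by
  simp only [List.mem_filter, PySem.List.mem_pyRange_one, pvIsP, decide_eq_true_eq]
  constructor
  · rintro ⟨⟨h1, h2⟩, h3⟩
    exact ⟨h1, by omega, h3⟩
  · rintro ⟨h1, h2, h3⟩
    exact ⟨⟨h1, by omega⟩, h3⟩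

lemma pvFilterIsP_sorted (b : Int) :
    ((PySem.List.pyRange 2 b 1).filter pvIsP).Pairwise (· < ·) :=
  (PySem.List.pairwise_lt_pyRange_one 2 b).filter _

-- trial division by all primes up to a bound B ≥ isqrt(x) decides primality of x
lemma pvTrialB_prime_iff (x : Int) (hx : 2 ≤ x) (B : Int) (ps : List Int)
    (hsort : ps.Pairwise (· < ·))
    (hmem : ∀ q : Int, q ∈ ps ↔ 2 ≤ q ∧ q ≤ B ∧ Nat.Prime q.toNat)
    (hB : ((Nat.sqrt x.toNat : Nat) : Int) ≤ B) :
    (pvTrialB x ps = true) ↔ Nat.Prime x.toNat := by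
  rw [pvTrialB_eq x ps hsort (fun p hp => ((hmem p).mp hp).1)]
  rw [← pvNoSmallDiv_iff_prime x hx]
  constructor
  · intro h i h2i hii hdvd
    obtain ⟨n, rfl⟩ : ∃ n : ℕ, x = (n : Int) := ⟨x.toNat, (Int.toNat_of_nonneg (by omega)).symm⟩
    obtain ⟨j, rfl⟩ : ∃ j : ℕ, i = (j : Int) := ⟨i.toNat, (Int.toNat_of_nonneg (by omega)).symm⟩
    have h2n : 2 ≤ n := by exact_mod_cast hx
    have h2j : 2 ≤ j := by exact_mod_cast h2i
    have hjj : j * j ≤ n := by exact_mod_cast hii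
    have hjd : j ∣ n := by exact_mod_cast hdvd
    set p := n.minFac with hp
    have hprime : p.Prime := Nat.minFac_prime (by omega)
    have hpd : p ∣ n := Nat.minFac_dvd n
    have hpj : p ≤ j := Nat.minFac_le_of_dvd h2j hjd
    have hpp : p * p ≤ n := le_trans (Nat.mul_le_mul hpj hpj) hjj
    have hpB : (p : Int) ≤ B := by
      have h1 : p ≤ Nat.sqrt (((n : Int)).toNat) := by
        rw [Int.toNat_natCast]
        exact Nat.le_sqrt.mpr hpp
      calc (p : Int) ≤ ((Nat.sqrt ((n : Int)).toNat : Nat) : Int) := by exact_mod_cast h1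
        _ ≤ B := hB
    have hpmem : (p : Int) ∈ ps := (hmem (p : Int)).mpr
      ⟨by exact_mod_cast hprime.two_le, hpB, by rw [Int.toNat_natCast]; exact hprime⟩
    exact h (p : Int) hpmem (by exact_mod_cast hpp) (by exact_mod_cast hpd)
  · intro h p hp hpp hdvd
    obtain ⟨h2p, -, -⟩ := (hmem p).mp hp
    exact h p h2p hpp hdvd

-- the building loop produces exactly the primes of range(2, L + 1)
lemma pvBuildPrimesB_eq (L : Nat) :
    ∀ (k : Nat) (a : Int), 2 ≤ a → a ≤ (L : Int) + 1 → ((L : Int) + 1 - a).toNat ≤ k →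
    pvBuildPrimesB (PySem.List.pyRange a ((L : Int) + 1) 1)
        ((PySem.List.pyRange 2 a 1).filter pvIsP)
      = (PySem.List.pyRange 2 ((L : Int) + 1) 1).filter pvIsP := by
  intro k
  induction k with
  | zero =>
    intro a h2a haL hk
    have ha : a = (L : Int) + 1 := by omega
    subst ha
    rw [PySem.List.pyRange_one_eq_nil (by omega)]
    rfl
  | succ k ih =>
    intro a h2a haL hk
    by_cases ha : a < (L : Int) + 1
    · rw [PySem.List.pyRange_one_cons ha]
      have hmem : ∀ q : Int, q ∈ (PySem.List.pyRange 2 a 1).filter pvIsP ↔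
          2 ≤ q ∧ q ≤ a - 1 ∧ Nat.Prime q.toNat := fun q => pvMemFilterIsP a q
      have hBa : ((Nat.sqrt a.toNat : Nat) : Int) ≤ a - 1 := by
        have h1 : Nat.sqrt a.toNat < a.toNat := Nat.sqrt_lt_self (by omega)
        omega
      have htrial : (pvTrialB a ((PySem.List.pyRange 2 a 1).filter pvIsP) = true)
          ↔ Nat.Prime a.toNat :=
        pvTrialB_prime_iff a h2a (a - 1) _ (pvFilterIsP_sorted a) hmem hBa
      have hsplit : PySem.List.pyRange 2 (a + 1) 1 = PySem.List.pyRange 2 a 1 ++ [a] :=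
        PySem.List.pyRange_one_succ_right h2a
      rw [pvBuildPrimesB]
      by_cases hprime : Nat.Prime a.toNat
      · rw [if_pos (htrial.mpr hprime)]
        have hstep : (PySem.List.pyRange 2 a 1).filter pvIsP ++ [a]
            = (PySem.List.pyRange 2 (a + 1) 1).filter pvIsP := by
          rw [hsplit, List.filter_append]
          simp [pvIsP, hprime]
        rw [hstep]
        exact ih (a + 1) (by omega) (by omega) (by omega)
      · rw [if_neg (fun hc => hprime (htrial.mp hc))]
        have hstep : (PySem.List.pyRange 2 a 1).filter pvIsP
            = (PySem.List.pyRange 2 (a + 1) 1).filter pvIsP := by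
          rw [hsplit, List.filter_append]
          simp [pvIsP, hprime]
        rw [hstep]
        exact ih (a + 1) (by omega) (by omega) (by omega)
    · have ha' : a = (L : Int) + 1 := by omega
      subst ha'
      rw [PySem.List.pyRange_one_eq_nil (by omega)]
      rfl

lemma pvPrimesTable_eq (L : Nat) :
    pvBuildPrimesB (PySem.List.pyRange 2 ((L : Int) + 1) 1) []
      = (PySem.List.pyRange 2 ((L : Int) + 1) 1).filter pvIsP := by
  by_cases hL : 1 ≤ L
  · have h0 : (PySem.List.pyRange 2 (2 : Int) 1).filter pvIsP = [] := by
      rw [PySem.List.pyRange_one_eq_nil (by omega)]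
      rfl
    have := pvBuildPrimesB_eq L (((L : Int) + 1 - 2).toNat) 2 (by omega) (by omega) (by omega)
    rw [h0] at this
    exact this
  · have hL0 : L = 0 := by omega
    subst hL0
    rw [PySem.List.pyRange_one_eq_nil (by omega)]
    rfl

lemma pvPointwise (m x : Int) (hx : x ≤ m) :
    pvIsPrimeA x = (decide (2 ≤ x)
      && pvTrialB x (pvBuildPrimesB (PySem.List.pyRange 2 ((pvSqrtLoopB m 0 : Int) + 1) 1) [])) := by
  rw [pvPrimesTable_eq (pvSqrtLoopB m 0), pvSqrtLoopB_zero m]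
  set L : Nat := Nat.sqrt m.toNat with hLdef
  by_cases h2 : 2 ≤ x
  · rw [Bool.eq_iff_iff]
    simp only [Bool.and_eq_true, h2, decide_true, true_and]
    -- A's side: the loop over range(2, int(sqrt x) + 1)
    have hA : (pvIsPrimeA x = true) ↔ ∀ i : Int, 2 ≤ i → i * i ≤ x → ¬ i ∣ x := by
      unfold pvIsPrimeA
      rw [if_neg (by omega), List.all_eq_true]
      constructor
      · intro h i h2i hii hdvd
        have hmemi : i ∈ PySem.List.pyRange 2 ((Nat.sqrt x.toNat : Int) + 1) 1 := by
          rw [PySem.List.mem_pyRange_one]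
          have := (pvLeSqrtInt x i (by omega) (by omega)).mpr hii
          omega
        have := h i hmemi
        rw [Bool.not_eq_eq_eq_not, Bool.not_true, beq_eq_false_iff_ne] at this
        exact this ((PySem.Int.mod_eq_zero_iff_dvd x i).mpr hdvd)
      · intro h i hmemi
        rw [PySem.List.mem_pyRange_one] at hmemi
        have hii : i * i ≤ x := (pvLeSqrtInt x i (by omega) (by omega)).mp (by omega)
        rw [Bool.not_eq_eq_eq_not, Bool.not_true, beq_eq_false_iff_ne]
        intro hc
        exact h i hmemi.1 hii ((PySem.Int.mod_eq_zero_iff_dvd x i).mp hc)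
    rw [hA, pvNoSmallDiv_iff_prime x h2]
    have hB : ((Nat.sqrt x.toNat : Nat) : Int) ≤ (L : Int) := by
      have h1 : Nat.sqrt x.toNat ≤ L := by
        rw [hLdef]
        exact Nat.sqrt_le_sqrt (by omega)
      exact_mod_cast h1
    exact (pvTrialB_prime_iff x h2 (L : Int) _ (pvFilterIsP_sorted ((L : Int) + 1))
      (fun q => by simpa using pvMemFilterIsP ((L : Int) + 1) q) hB).symm
  · have hAf : pvIsPrimeA x = false := by
      unfold pvIsPrimeA
      rw [if_pos (by omega)]
    rw [hAf]
    simp [h2]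

-- ===== VERDICT (by name: the statement is the Claim_ definition above) =====
theorem is_prime_square_spec : Claim_equal_is_prime_square := by
  intro numbers _
  unfold Spec_is_prime_square is_prime_square is_prime_square_alt
  by_cases hne : numbers = []
  · subst hne; rfl
  · rw [if_neg (by simpa using hne)]
    rcases hmax : PySem.List.max? numbers (fun y => y) with _ | m
    · exact absurd ((PySem.List.max?_eq_none_iff numbers _).mp hmax) hne
    · have hub : ∀ y ∈ numbers, y ≤ m := PySem.List.max?_isMax hmax
      have hfilter : numbers.filter pvIsPrimeA
          = numbers.filter (fun x => decide (2 ≤ x)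
              && pvTrialB x (pvBuildPrimesB
                   (PySem.List.pyRange 2 ((pvSqrtLoopB m 0 : Int) + 1) 1) [])) :=
        List.filter_congr (fun x hx => pvPointwise m x (hub x hx))
      rw [hfilter]
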